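-- pv_equiv track=rewrite | github.com/zaemyung/trl | trl/extras/mpo/rm_ethical_reasoning.py | join_under_word_limit
-- ===== SOURCE A (Python) =====
-- def join_under_word_limit(refinements: list[str], N: int, sep: str = "\n===\n") -> str:
--     """
--     Join strings from `refinements` with `sep`, stopping before the total
--     whitespace‑separated word count exceeds `N`.
--
--     Parameters
--     ----------
--     refinements : list[str]
--         The strings to join.
--     N : int
--         Maximum total number of words allowed in the joined result.
--     sep : str, optional
--         Separator to place between pieces. Defaults to "\n===\n".
--
--     Returns
--     -------
--     str
--         The joined string whose word count is ≤ N.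
--     """
--     joined_parts = []
--     word_count = 0
--
--     for chunk in refinements:
--         words_in_chunk = len(chunk.split())
--         if word_count + words_in_chunk > N:
--             break
--         joined_parts.append(chunk)
--         word_count += words_in_chunk
--
--     return sep.join(joined_parts)
-- ===== SOURCE B (Python) =====
-- from itertools import accumulate
--
--
-- def _bisect_right(a, x):
--     """Recursive binary search: number of elements of sorted list `a` that are <= x."""
--     if not a:
--         return 0
--     mid = len(a) // 2
--     if x < a[mid]:
--         return _bisect_right(a[:mid], x)
--     return mid + 1 + _bisect_right(a[mid + 1:], x)
--
--
-- def join_under_word_limit(refinements: list[str], N: int, sep: str = "\n===\n") -> str: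
--     prefix = list(accumulate(len(c.split()) for c in refinements))
--     k = _bisect_right(prefix, N)
--     return sep.join(refinements[:k])
-- ===== Notes on version B (the rewrite author's own statement) =====
-- stated objective: alternative
-- what changed: Instead of a linear early-stopping scan with a running counter, B builds the monotone prefix-sum array of word counts and binary-searches (recursive bisect_right) for the cutoff index, then joins that slice.
import Mathlib
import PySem

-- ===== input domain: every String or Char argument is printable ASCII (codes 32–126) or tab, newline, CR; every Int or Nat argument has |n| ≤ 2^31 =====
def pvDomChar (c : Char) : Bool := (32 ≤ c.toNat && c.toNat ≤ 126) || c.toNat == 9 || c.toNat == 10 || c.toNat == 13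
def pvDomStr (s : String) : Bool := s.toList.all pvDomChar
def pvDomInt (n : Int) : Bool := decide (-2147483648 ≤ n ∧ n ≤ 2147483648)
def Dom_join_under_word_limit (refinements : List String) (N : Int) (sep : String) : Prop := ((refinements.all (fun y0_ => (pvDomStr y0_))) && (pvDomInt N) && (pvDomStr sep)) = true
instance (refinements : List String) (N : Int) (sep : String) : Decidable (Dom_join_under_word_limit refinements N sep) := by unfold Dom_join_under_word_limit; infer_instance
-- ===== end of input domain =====

-- B replaces A's linear early-stopping scan by prefix sums + a recursive binary search
-- (bisect_right) for the cutoff index; same return values (objective: alternative).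

-- ===== PORT A =====
-- A's for-loop with break, as structural recursion carrying word_count; returns joined_parts
def pvLoopA (N : Int) : List String → Int → List String
  | [], _ => []
  | chunk :: rest, word_count =>
    let words_in_chunk : Int := ((PySem.Str.split₀ chunk).length : Int)
    if word_count + words_in_chunk > N then []
    else chunk :: pvLoopA N rest (word_count + words_in_chunk)

def join_under_word_limit (refinements : List String) (N : Int) (sep : String) : String :=
  PySem.Str.join sep (pvLoopA N refinements 0)

-- ===== PORT B =====
-- itertools.accumulate (inclusive prefix sums from a start value)
def pvAccum : Int → List Int → List Int
  | _, [] => []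
  | acc, x :: xs => (acc + x) :: pvAccum (acc + x) xs

-- Source B's recursive _bisect_right; a[mid] is exact as getD since 0 ≤ mid < a.length,
-- and the slices a[:mid] / a[mid+1:] are exact as take/drop for these in-range indices
def pvBisect (a : List Int) (x : Int) : Nat :=
  if h : a = [] then 0
  else
    let mid := a.length / 2
    if x < a.getD mid 0 then pvBisect (a.take mid) x
    else mid + 1 + pvBisect (a.drop (mid + 1)) x
termination_by a.length
decreasing_by
  · simp only [List.length_take]
    have : 0 < a.length := List.length_pos_iff.mpr h
    omega
  · simp only [List.length_drop]
    have : 0 < a.length := List.length_pos_iff.mpr h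
    omega

def join_under_word_limit_alt (refinements : List String) (N : Int) (sep : String) : String :=
  let prefs := pvAccum 0 (refinements.map (fun c => ((PySem.Str.split₀ c).length : Int)))
  let k := pvBisect prefs N
  PySem.Str.join sep (refinements.take k)

-- ===== PRECONDITION & SPEC =====
def Spec_join_under_word_limit (refinements : List String) (N : Int) (sep : String) (out : String) : Prop := out = join_under_word_limit_alt refinements N sep
instance (refinements : List String) (N : Int) (sep : String) (out : String) : Decidable (Spec_join_under_word_limit refinements N sep out) := by unfold Spec_join_under_word_limit; infer_instance

-- ===== CLAIM =====
def Claim_equal_join_under_word_limit : Prop := ∀ (refinements : List String) (N : Int) (sep : String), Dom_join_under_word_limit refinements N sep → Spec_join_under_word_limit refinements N sep (join_under_word_limit refinements N sep)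

-- ===== LEMMAS AND PROOFS =====
-- A's break-loop from running count wc keeps exactly the chunks whose inclusive
-- prefix sum (started at wc) stays ≤ N.
theorem pvLoopA_eq_take (N : Int) (l : List String) (wc : Int) :
    pvLoopA N l wc
      = l.take (((pvAccum wc (l.map (fun c => ((PySem.Str.split₀ c).length : Int)))).takeWhile
          (fun v => decide (v ≤ N))).length) := by
  induction l generalizing wc with
  | nil => simp [pvLoopA, pvAccum]
  | cons h t ih =>
    simp only [pvLoopA, pvAccum, List.map_cons, List.takeWhile_cons]
    by_cases hc : wc + ((PySem.Str.split₀ h).length : Int) > N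
    · simp [hc, not_le.mpr hc]
    · simp only [hc, if_false]
      rw [ih]
      simp [not_lt.mp hc]

theorem takeWhile_append_neg {α : Type} (p : α → Bool) (l1 l2 : List α) (x : α)
    (hx : p x = false) : (l1 ++ x :: l2).takeWhile p = l1.takeWhile p := by
  induction l1 with
  | nil => simp [hx]
  | cons y ys ih =>
    simp only [List.cons_append, List.takeWhile_cons]
    cases p y <;> simp [ih]

theorem takeWhile_append_pos {α : Type} (p : α → Bool) (l1 l2 : List α) (x : α)
    (hx : p x = true) (hl : ∀ y ∈ l1, p y = true) :
    (l1 ++ x :: l2).takeWhile p = l1 ++ x :: l2.takeWhile p := by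
  induction l1 with
  | nil => simp [hx]
  | cons y ys ih =>
    have hy : p y = true := hl y (by simp)
    simp only [List.cons_append, List.takeWhile_cons, hy, if_true]
    simp [ih (fun z hz => hl z (by simp [hz]))]

-- binary search on a nondecreasing list counts the elements ≤ x
theorem pvBisect_correct (x : Int) :
    ∀ (n : Nat) (a : List Int), a.length ≤ n → a.Pairwise (· ≤ ·) →
      pvBisect a x = (a.takeWhile (fun v => decide (v ≤ x))).length := by
  intro n
  induction n with
  | zero =>
    intro a ha _
    have : a = [] := List.eq_nil_of_length_eq_zero (Nat.le_zero.mp ha)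
    subst this; simp [pvBisect]
  | succ m ih =>
    intro a ha hp
    by_cases hnil : a = []
    · subst hnil; simp [pvBisect]
    · have hlen : 0 < a.length := List.length_pos_iff.mpr hnil
      have hmid : a.length / 2 < a.length := Nat.div_lt_self hlen (by norm_num)
      have hdec : a = a.take (a.length / 2) ++ a[a.length / 2] :: a.drop (a.length / 2 + 1) := by
        conv_lhs => rw [← List.take_append_drop (a.length / 2) a]
        rw [List.drop_eq_getElem_cons hmid]
      have hget : a.getD (a.length / 2) 0 = a[a.length / 2] := List.getD_eq_getElem a 0 hmid
      rw [pvBisect]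
      simp only [hnil, dif_neg, not_false_iff]
      -- pairwise facts from the decomposition
      have hp' := hp
      rw [hdec] at hp'
      rw [List.pairwise_append] at hp'
      obtain ⟨hp1, hp2, hcross⟩ := hp'
      rw [List.pairwise_cons] at hp2
      obtain ⟨hmid_le, hp3⟩ := hp2
      by_cases hc : x < a.getD (a.length / 2) 0
      · simp only [hc, if_true]
        have hxmid : (decide (a[a.length / 2] ≤ x)) = false := by
          rw [hget] at hc; simp [not_le.mpr hc]
        have htw : a.takeWhile (fun v => decide (v ≤ x))
            = (a.take (a.length / 2)).takeWhile (fun v => decide (v ≤ x)) := by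
          conv_lhs => rw [hdec]
          exact takeWhile_append_neg _ _ _ _ hxmid
        rw [htw]
        exact ih (a.take (a.length / 2)) (by simp [List.length_take]; omega)
          (hp.sublist (List.take_sublist _ _))
      · simp only [hc, if_false]
        have hxmid : (decide (a[a.length / 2] ≤ x)) = true := by
          rw [hget] at hc; simp [not_lt.mp hc]
        have hall : ∀ y ∈ a.take (a.length / 2), (decide (y ≤ x)) = true := by
          intro y hy
          have h1 : y ≤ a[a.length / 2] := hcross y hy _ (List.mem_cons_self ..)
          have h2 : a[a.length / 2] ≤ x := by rw [hget] at hc; exact not_lt.mp hc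
          simp [le_trans h1 h2]
        have htw : a.takeWhile (fun v => decide (v ≤ x))
            = a.take (a.length / 2) ++ a[a.length / 2] ::
              (a.drop (a.length / 2 + 1)).takeWhile (fun v => decide (v ≤ x)) := by
          conv_lhs => rw [hdec]
          exact takeWhile_append_pos _ _ _ _ hxmid hall
        rw [htw]
        rw [ih (a.drop (a.length / 2 + 1)) (by simp [List.length_drop]; omega)
          (hp.sublist (List.drop_sublist _ _))]
        simp [List.length_take]
        omega

-- prefix sums of nonnegative counts start at ≥ the seed …
theorem pvAccum_ge (cs : List Int) (s : Int) (hcs : ∀ c ∈ cs, 0 ≤ c) :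
    ∀ y ∈ pvAccum s cs, s ≤ y := by
  induction cs generalizing s with
  | nil => simp [pvAccum]
  | cons c cs' ih =>
    intro y hy
    simp only [pvAccum, List.mem_cons] at hy
    have hc : 0 ≤ c := hcs c (by simp)
    rcases hy with rfl | hy
    · omega
    · have := ih (s + c) (fun z hz => hcs z (by simp [hz])) y hy
      omega

-- … hence are nondecreasing
theorem pvAccum_pairwise (cs : List Int) (s : Int) (hcs : ∀ c ∈ cs, 0 ≤ c) :
    (pvAccum s cs).Pairwise (· ≤ ·) := by
  induction cs generalizing s with
  | nil => simp [pvAccum]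
  | cons c cs' ih =>
    simp only [pvAccum, List.pairwise_cons]
    refine ⟨pvAccum_ge cs' (s + c) (fun z hz => hcs z (by simp [hz])), ?_⟩
    exact ih (s + c) (fun z hz => hcs z (by simp [hz]))

-- ===== VERDICT =====
theorem join_under_word_limit_spec : Claim_equal_join_under_word_limit := by
  intro refinements N sep _
  unfold Spec_join_under_word_limit join_under_word_limit join_under_word_limit_alt
  rw [pvLoopA_eq_take]
  congr 1
  rw [pvBisect_correct N _ _ (le_refl _)
    (pvAccum_pairwise _ 0 (by intro c hc; simp at hc; obtain ⟨s, _, rfl⟩ := hc; positivity))]
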